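-- pv_equiv track=rewrite | github.com/sumeyaaaa/10x-AI-CHALLENGE | trp1-ai-artist/src/ai_content/utils/lyrics_parser.py | extract_lyrics_sections
-- ===== SOURCE A (Python) =====
-- def extract_lyrics_sections(lyrics: str) -> dict[str, list[str]]:
--     """
--     Extract sections from structured lyrics.
--
--     Returns:
--         Dict mapping section names to line lists
--     """
--     sections: dict[str, list[str]] = {}
--     current_section = "intro"
--     current_lines: list[str] = []
--
--     for line in lyrics.split("\n"):
--         line = line.strip()
--
--         # Check for section tag
--         if line.startswith("[") and line.endswith("]"):
--             # Save previous section
--             if current_lines: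
--                 sections[current_section] = current_lines
--
--             # Start new section
--             current_section = line[1:-1]  # Remove brackets
--             current_lines = []
--         elif line:
--             current_lines.append(line)
--
--     # Save last section
--     if current_lines:
--         sections[current_section] = current_lines
--
--     return sections
-- ===== SOURCE B (Python) =====
-- def extract_lyrics_sections(lyrics: str) -> dict[str, list[str]]:
--     """Segment-based rewrite: strip all lines up front, then repeatedly scan
--     for the next [tag] line and emit the segment before it as one section."""
--     sections: dict[str, list[str]] = {}
--     name = "intro"
--     lines = [ln.strip() for ln in lyrics.split("\n")]
--     while True:
--         i = 0
--         while i < len(lines) and not (lines[i].startswith("[") and lines[i].endswith("]")):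
--             i += 1
--         body = [ln for ln in lines[:i] if ln]
--         if body:
--             sections[name] = body
--         if i == len(lines):
--             return sections
--         name = lines[i][1:-1]
--         lines = lines[i + 1:]
-- ===== Notes on version B (the rewrite author's own statement) =====
-- stated objective: alternative
-- what changed: A is a single stateful pass keeping a current-section accumulator; B strips all lines up front and then works segment-by-segment: scan for the next [tag] line, emit the whole preceding segment (non-empty lines) as one section, and continue after the tag.
import Mathlib
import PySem

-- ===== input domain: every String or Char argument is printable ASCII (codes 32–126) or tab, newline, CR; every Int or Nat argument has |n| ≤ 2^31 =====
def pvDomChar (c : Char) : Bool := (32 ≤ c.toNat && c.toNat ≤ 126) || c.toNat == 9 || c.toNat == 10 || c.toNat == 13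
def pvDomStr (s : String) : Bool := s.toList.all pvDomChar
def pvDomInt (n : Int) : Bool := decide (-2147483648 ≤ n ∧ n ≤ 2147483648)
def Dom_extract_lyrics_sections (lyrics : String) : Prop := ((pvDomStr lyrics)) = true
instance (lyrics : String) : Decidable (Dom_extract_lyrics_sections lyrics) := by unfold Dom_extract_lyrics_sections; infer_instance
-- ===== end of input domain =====

-- B replaces A's single stateful pass (current-section accumulator) by a segment-based scan:
-- strip all lines up front, then repeatedly find the next [tag] line and emit the segment
-- before it as one section (objective: alternative decomposition, same asymptotic cost).

-- ===== PORT A =====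
-- literal transliteration of A: one fold over the raw lines carrying (sections, current_section, current_lines)
def extract_lyrics_sections (lyrics : String) : List (String × List String) :=
  let lines := (PySem.Str.split? lyrics "\n").getD []
  let st := lines.foldl
    (fun (st : PySem.Dict String (List String) × String × List String) line =>
      let l := PySem.Str.strip line
      if PySem.Str.startswith l "[" && PySem.Str.endswith l "]" then
        ((if st.2.2 = [] then st.1 else st.1.insert st.2.1 st.2.2),
         PySem.Str.slice l (some 1) (some (-1)), [])
      else if l ≠ "" then (st.1, st.2.1, st.2.2 ++ [l])
      else st)
    (PySem.Dict.mk [], "intro", [])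
  (if st.2.2 = [] then st.1 else st.1.insert st.2.1 st.2.2).items

-- ===== PORT B =====
def pvIsTag (s : String) : Bool :=
  PySem.Str.startswith s "[" && PySem.Str.endswith s "]"

def pvTagName (s : String) : String :=
  PySem.Str.slice s (some 1) (some (-1))

-- the while-loop of Source B: i = index of first tag line (or len), emit lines[:i], continue after it
def pvAltGo (sections : PySem.Dict String (List String)) (name : String)
    (lines : List String) : PySem.Dict String (List String) :=
  let i := lines.findIdx pvIsTag
  let body := (lines.take i).filter (fun l => decide (l ≠ ""))
  let d' := if body = [] then sections else sections.insert name body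
  if h : i = lines.length then d'
  else pvAltGo d' (pvTagName lines[i]!) (lines.drop (i + 1))
termination_by lines.length
decreasing_by
  have hle := List.findIdx_le_length (p := pvIsTag) (xs := lines)
  simp only [List.length_drop]
  omega

def extract_lyrics_sections_alt (lyrics : String) : List (String × List String) :=
  (pvAltGo (PySem.Dict.mk []) "intro"
    (((PySem.Str.split? lyrics "\n").getD []).map PySem.Str.strip)).items

-- ===== PRECONDITION & SPEC =====
def Spec_extract_lyrics_sections (lyrics : String) (out : List (String × List String)) : Prop := out = extract_lyrics_sections_alt lyrics
instance (lyrics : String) (out : List (String × List String)) : Decidable (Spec_extract_lyrics_sections lyrics out) := by unfold Spec_extract_lyrics_sections; infer_instance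

-- ===== CLAIM (what is proved, stated in full; the proofs are below) =====
def Claim_equal_extract_lyrics_sections : Prop := ∀ (lyrics : String), Dom_extract_lyrics_sections lyrics → Spec_extract_lyrics_sections lyrics (extract_lyrics_sections lyrics)

-- ===== LEMMAS AND PROOFS =====

-- A's loop body and its final "save last section" step, named for the proofs
def pvStep (st : PySem.Dict String (List String) × String × List String)
    (line : String) : PySem.Dict String (List String) × String × List String :=
  let l := PySem.Str.strip line
  if pvIsTag l then
    ((if st.2.2 = [] then st.1 else st.1.insert st.2.1 st.2.2), pvTagName l, [])
  else if l ≠ "" then (st.1, st.2.1, st.2.2 ++ [l])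
  else st

def pvFin (st : PySem.Dict String (List String) × String × List String) :
    PySem.Dict String (List String) :=
  if st.2.2 = [] then st.1 else st.1.insert st.2.1 st.2.2

-- pvAltGo generalized by the pending lines of the current segment
def pvAux (d : PySem.Dict String (List String)) (name : String) (cur : List String)
    (lines : List String) : PySem.Dict String (List String) :=
  let i := lines.findIdx pvIsTag
  let body := cur ++ (lines.take i).filter (fun l => decide (l ≠ ""))
  let d' := if body = [] then d else d.insert name body
  if h : i = lines.length then d'
  else pvAux d' (pvTagName lines[i]!) [] (lines.drop (i + 1))
termination_by lines.length
decreasing_by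
  have hle := List.findIdx_le_length (p := pvIsTag) (xs := lines)
  simp only [List.length_drop]
  omega

theorem pvAux_nil_cur (n : Nat) : ∀ (lines : List String), lines.length ≤ n →
    ∀ (d : PySem.Dict String (List String)) (name : String),
    pvAux d name [] lines = pvAltGo d name lines := by
  induction n with
  | zero =>
    intro lines hl d name
    have h0 : lines = [] := List.eq_nil_of_length_eq_zero (Nat.le_zero.mp hl)
    subst h0
    rw [pvAux, pvAltGo]
    simp
  | succ n ih =>
    intro lines hl d name
    rw [pvAux, pvAltGo]
    simp only [List.nil_append]
    split_ifs with h1 h2 <;>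
      first
        | rfl
        | exact ih _ (by simp only [List.length_drop]; omega) _ _

theorem pvAux_nil_cur' (lines : List String) (d : PySem.Dict String (List String))
    (name : String) : pvAux d name [] lines = pvAltGo d name lines :=
  pvAux_nil_cur lines.length lines le_rfl d name

theorem pvAux_nil (d : PySem.Dict String (List String)) (name : String)
    (cur : List String) : pvAux d name cur [] = pvFin (d, name, cur) := by
  rw [pvAux]; simp [pvFin]

theorem pvAux_cons_tag (d : PySem.Dict String (List String)) (name : String)
    (cur : List String) (s : String) (ls : List String) (h : pvIsTag s = true) :
    pvAux d name cur (s :: ls) = pvAux (pvFin (d, name, cur)) (pvTagName s) [] ls := by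
  rw [pvAux]
  simp [List.findIdx_cons, h, pvFin]

theorem pvAux_cons_line (d : PySem.Dict String (List String)) (name : String)
    (cur : List String) (s : String) (ls : List String) (h : pvIsTag s = false)
    (hne : s ≠ "") :
    pvAux d name cur (s :: ls) = pvAux d name (cur ++ [s]) ls := by
  conv_lhs => rw [pvAux]
  conv_rhs => rw [pvAux]
  simp [List.findIdx_cons, h, hne]

theorem pvAux_cons_empty (d : PySem.Dict String (List String)) (name : String)
    (cur : List String) (ls : List String) (h : pvIsTag "" = false) :
    pvAux d name cur ("" :: ls) = pvAux d name cur ls := by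
  conv_lhs => rw [pvAux]
  conv_rhs => rw [pvAux]
  simp [List.findIdx_cons, h]

theorem pv_main (lines : List String) :
    ∀ (d : PySem.Dict String (List String)) (name : String) (cur : List String),
    pvFin (lines.foldl pvStep (d, name, cur)) =
      pvAux d name cur (lines.map PySem.Str.strip) := by
  induction lines with
  | nil => intro d name cur; simp [pvAux_nil]
  | cons l rest ih =>
    intro d name cur
    simp only [List.foldl_cons, List.map_cons]
    by_cases htag : pvIsTag (PySem.Str.strip l) = true
    · rw [pvAux_cons_tag _ _ _ _ _ htag, ← ih]
      simp [pvStep, htag, pvFin]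
    · rw [Bool.not_eq_true] at htag
      by_cases hne : PySem.Str.strip l = ""
      · rw [hne, pvAux_cons_empty _ _ _ _ (by rw [← hne]; exact htag), ← ih]
        simp [pvStep, hne, show pvIsTag "" = false from rfl]
      · rw [pvAux_cons_line _ _ _ _ _ htag hne, ← ih]
        simp [pvStep, htag, hne]

-- ===== VERDICT (by name: the statement is the Claim_ definition above) =====
theorem extract_lyrics_sections_spec : Claim_equal_extract_lyrics_sections := by
  intro lyrics _
  show (pvFin (((PySem.Str.split? lyrics "\n").getD []).foldl pvStep
      (PySem.Dict.mk [], "intro", []))).items =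
    (pvAltGo (PySem.Dict.mk []) "intro"
      (((PySem.Str.split? lyrics "\n").getD []).map PySem.Str.strip)).items
  rw [pv_main, pvAux_nil_cur']
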